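-- pv_equiv track=rewrite | github.com/gabrielgadea/converter | src/converter/core.py | validate_text_coherence
-- ===== SOURCE A (Python) =====
-- def validate_text_coherence(text: str) -> str:
--     """
--     Valida coerência do texto extraído e tenta corrigir problemas.
--
--     Detecta:
--     - Excesso de palavras de uma letra (indicativo de fragmentação)
--     - Padrões de texto corrompido
--     """
--     if not text or len(text) < 50:
--         return text
--
--     words = text.split()
--     if not words:
--         return text
--
--     # Conta palavras de uma única letra (exceto artigos/preposições)
--     valid_single_chars = {'a', 'e', 'i', 'o', 'u', 'é', 'à', 'A', 'E', 'I', 'O', 'U', 'É', 'À'}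
--     single_char_words = sum(
--         1 for w in words
--         if len(w) == 1 and w.isalpha() and w not in valid_single_chars
--     )
--     single_char_ratio = single_char_words / len(words) if words else 0
--
--     # Se mais de 20% são letras únicas suspeitas, tentar juntar
--     if single_char_ratio > 0.20:
--         result_words = []
--         current_fragment = []
--
--         for word in words:
--             if len(word) == 1 and word.isalpha() and word not in valid_single_chars:
--                 current_fragment.append(word)
--             else:
--                 if current_fragment:
--                     # Junta fragmento se tem 3+ letras
--                     if len(current_fragment) >= 3:
--                         result_words.append("".join(current_fragment))
--                     else:
--                         result_words.extend(current_fragment)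
--                     current_fragment = []
--                 result_words.append(word)
--
--         if current_fragment:
--             if len(current_fragment) >= 3:
--                 result_words.append("".join(current_fragment))
--             else:
--                 result_words.extend(current_fragment)
--
--         text = " ".join(result_words)
--
--     return text
-- ===== SOURCE B (Python) =====
-- def validate_text_coherence(text: str) -> str:
--     if not text or len(text) < 50:
--         return text
--     words = text.split()
--     if not words:
--         return text
--     valid_single_chars = {'a', 'e', 'i', 'o', 'u', 'é', 'à', 'A', 'E', 'I', 'O', 'U', 'É', 'À'}
--     def suspicious(w):
--         return len(w) == 1 and w.isalpha() and w not in valid_single_chars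
--     flags = [suspicious(w) for w in words]
--     if sum(flags) / len(words) > 0.20:
--         out = []
--         i, n = 0, len(words)
--         while i < n:
--             j = i
--             while j < n and flags[j] == flags[i]:
--                 j += 1
--             run = words[i:j]
--             if flags[i] and j - i >= 3:
--                 out.append("".join(run))
--             else:
--                 out.extend(run)
--             i = j
--         text = " ".join(out)
--     return text
-- ===== Notes on version B (the rewrite author's own statement) =====
-- stated objective: alternative
-- what changed: A merges fragments with a stateful loop carrying result_words/current_fragment accumulators and flush logic duplicated after the loop; B flags each word once, slices the word list into maximal runs of equal flag with a two-pointer scan, and emits each run joined or verbatim, with no carried fragment state.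
import Mathlib
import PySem

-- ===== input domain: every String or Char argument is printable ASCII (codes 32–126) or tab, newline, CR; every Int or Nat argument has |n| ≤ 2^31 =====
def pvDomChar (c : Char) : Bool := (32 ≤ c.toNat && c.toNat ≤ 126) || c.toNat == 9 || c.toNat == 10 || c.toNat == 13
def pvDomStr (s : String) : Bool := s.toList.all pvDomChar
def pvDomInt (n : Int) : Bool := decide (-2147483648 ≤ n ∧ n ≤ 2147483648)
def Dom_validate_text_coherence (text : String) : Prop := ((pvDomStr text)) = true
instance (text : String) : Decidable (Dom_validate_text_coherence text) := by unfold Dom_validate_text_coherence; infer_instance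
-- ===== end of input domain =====

-- B replaces A's accumulator-carrying fragment loop by a run-grouping pass (maximal runs of
-- equal suspicious-flags, each run emitted joined or verbatim); objective: alternative decomposition.

-- ===== PORT A =====
def pvA_valid : List String := ["a", "e", "i", "o", "u", "é", "à", "A", "E", "I", "O", "U", "É", "À"]

def pvA_susp (w : String) : Bool :=
  (PySem.Str.len w == 1) && PySem.Str.strIsalpha w && !(pvA_valid.contains w)

-- "".join(current_fragment) if len(current_fragment) >= 3, else the fragment's words
def pvA_flush (cur : List String) : List String :=
  if cur.length ≥ 3 then [PySem.Str.join "" cur] else cur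

-- the `for word in words` loop with result_words / current_fragment accumulators,
-- including the trailing `if current_fragment:` flush
def pvA_loop : List String → List String → List String → List String
  | acc, cur, [] => acc ++ (if !cur.isEmpty then pvA_flush cur else [])
  | acc, cur, w :: ws =>
    if pvA_susp w then pvA_loop acc (cur ++ [w]) ws
    else pvA_loop ((acc ++ (if !cur.isEmpty then pvA_flush cur else [])) ++ [w]) [] ws

def validate_text_coherence (text : String) : String :=
  if text == "" || PySem.Str.len text < 50 then text
  else if PySem.Str.split₀ text == [] then text
  -- Python compares the float single_char_words/len(words) with the float literal 0.20;
  -- the exact integer comparison 5*count > len agrees with it for any list shorter than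
  -- ~2^49 words (rounding is monotone and the gap to 1/5 dwarfs one ulp).
  else if 5 * (PySem.Str.split₀ text).countP (fun w => pvA_susp w)
            > (PySem.Str.split₀ text).length then
    PySem.Str.join " " (pvA_loop [] [] (PySem.Str.split₀ text))
  else text

-- ===== PORT B =====
def pvB_valid : List String := ["a", "e", "i", "o", "u", "é", "à", "A", "E", "I", "O", "U", "É", "À"]

def pvB_susp (w : String) : Bool :=
  (PySem.Str.len w == 1) && PySem.Str.strIsalpha w && !(pvB_valid.contains w)

-- the index two-pointer scan of Source B: split the flagged words into maximal runs of equal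
-- flag (words[i:j] with flags[i..j) constant); takeWhile/dropWhile are run [i:j) / jump i := j
def pvB_chunks : List (String × Bool) → List (Bool × List String)
  | [] => []
  | (w, f) :: rest =>
    (f, w :: (rest.takeWhile (fun p => p.2 == f)).map Prod.fst) ::
      pvB_chunks (rest.dropWhile (fun p => p.2 == f))
  termination_by l => l.length
  decreasing_by
    exact Nat.lt_succ_of_le (List.length_dropWhile_le _ _)

-- emit one run: joined if suspicious and length ≥ 3, verbatim otherwise
def pvB_emit (f : Bool) (run : List String) : List String :=
  if f && run.length ≥ 3 then [PySem.Str.join "" run] else run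

def validate_text_coherence_alt (text : String) : String :=
  if text == "" || PySem.Str.len text < 50 then text
  else if PySem.Str.split₀ text == [] then text
  -- same float-vs-exact note as in port A
  else if 5 * ((PySem.Str.split₀ text).map pvB_susp).count true
            > (PySem.Str.split₀ text).length then
    PySem.Str.join " "
      ((pvB_chunks ((PySem.Str.split₀ text).zip ((PySem.Str.split₀ text).map pvB_susp))).foldl
        (fun acc p => acc ++ pvB_emit p.1 p.2) [])
  else text

-- ===== PRECONDITION & SPEC =====
def Spec_validate_text_coherence (text : String) (out : String) : Prop := out = validate_text_coherence_alt text
instance (text : String) (out : String) : Decidable (Spec_validate_text_coherence text out) := by unfold Spec_validate_text_coherence; infer_instance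

-- ===== CLAIM (what is proved, stated in full; the proofs are below) =====
def Claim_equal_validate_text_coherence : Prop := ∀ (text : String), Dom_validate_text_coherence text → Spec_validate_text_coherence text (validate_text_coherence text)

-- ===== LEMMAS AND PROOFS =====

theorem susp_eq : pvB_susp = pvA_susp := by
  funext w; simp [pvA_susp, pvB_susp, pvA_valid, pvB_valid]

-- B's run-emission of a word list, as a flatMap over its chunks
def pvBRun (ws : List String) : List String :=
  (pvB_chunks (ws.map (fun w => (w, pvA_susp w)))).flatMap (fun p => pvB_emit p.1 p.2)

theorem chunks_nil : pvB_chunks [] = [] := by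
  rw [pvB_chunks.eq_def]

theorem chunks_cons (w : String) (f : Bool) (rest : List (String × Bool)) :
    pvB_chunks ((w, f) :: rest)
      = (f, w :: (rest.takeWhile (fun p => p.2 == f)).map Prod.fst) ::
          pvB_chunks (rest.dropWhile (fun p => p.2 == f)) := by
  rw [pvB_chunks.eq_def]

theorem emit_false (run : List String) : pvB_emit false run = run := by simp [pvB_emit]

theorem emit_true (run : List String) : pvB_emit true run = pvA_flush run := by
  simp [pvB_emit, pvA_flush]

theorem fst_tag : (Prod.fst ∘ fun w : String => (w, pvA_susp w)) = id := rfl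

theorem tag_snd (f : Bool) :
    ((fun p : String × Bool => p.2 == f) ∘ (fun w => (w, pvA_susp w)))
      = (fun w => pvA_susp w == f) := rfl

theorem count_eq (ws : List String) :
    (ws.map pvA_susp).count true = ws.countP (fun w => pvA_susp w) := by
  induction ws with
  | nil => rfl
  | cons w ws ih =>
      rw [List.map_cons, List.count_cons, List.countP_cons, ih]
      cases h : pvA_susp w <;> simp

theorem flush_empty : pvA_flush [] = [] := by simp [pvA_flush]

theorem guard_flush (cur : List String) :
    (if !cur.isEmpty then pvA_flush cur else []) = pvA_flush cur := by
  cases cur <;> simp [pvA_flush]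

theorem bRun_cons_not_susp (w : String) (ws : List String) (h : pvA_susp w = false) :
    pvBRun (w :: ws) = w :: pvBRun ws := by
  cases ws with
  | nil => simp [pvBRun, chunks_cons, chunks_nil, h, emit_false]
  | cons v vs =>
      simp only [pvBRun, List.map_cons, h, chunks_cons, List.flatMap_cons]
      cases hv : pvA_susp v with
      | false =>
          rw [List.takeWhile_cons_of_pos (by simp),
            List.dropWhile_cons_of_pos (by simp)]
          simp [emit_false]
      | true =>
          rw [List.takeWhile_cons_of_neg (by simp),
            List.dropWhile_cons_of_neg (by simp)]
          simp [emit_false, chunks_cons]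

theorem bRun_take_drop (ws : List String) :
    pvBRun ws = pvA_flush (ws.takeWhile (fun w => pvA_susp w))
      ++ pvBRun (ws.dropWhile (fun w => pvA_susp w)) := by
  cases ws with
  | nil => simp [pvBRun, chunks_nil, flush_empty]
  | cons w ws =>
      cases h : pvA_susp w with
      | false => simp [h, flush_empty]
      | true =>
          simp only [pvBRun, List.map_cons, h, chunks_cons, List.takeWhile_cons,
            List.dropWhile_cons, List.flatMap_cons, List.takeWhile_map,
            List.dropWhile_map, tag_snd, List.map_map, fst_tag, List.map_id,
            emit_true]
          simp

theorem loopA_eq (ws : List String) : ∀ (acc cur : List String),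
    pvA_loop acc cur ws
      = acc ++ pvA_flush (cur ++ ws.takeWhile (fun w => pvA_susp w))
          ++ pvBRun (ws.dropWhile (fun w => pvA_susp w)) := by
  induction ws with
  | nil =>
      intro acc cur
      simp only [pvA_loop, guard_flush, List.takeWhile_nil, List.dropWhile_nil,
        List.append_nil, pvBRun, List.map_nil, chunks_nil, List.flatMap_nil]
  | cons w ws ih =>
      intro acc cur
      cases h : pvA_susp w with
      | true =>
          simp only [pvA_loop, h, if_true, List.takeWhile_cons, List.dropWhile_cons, ih]
          simp
      | false =>
          simp only [pvA_loop, h, Bool.false_eq_true, if_false, List.takeWhile_cons,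
            List.dropWhile_cons, ih, guard_flush]
          rw [bRun_cons_not_susp w ws h, bRun_take_drop ws]
          simp [flush_empty]

theorem loopA_eq_bRun (ws : List String) : pvA_loop [] [] ws = pvBRun ws := by
  rw [loopA_eq ws [] [], bRun_take_drop ws]
  simp [flush_empty]

theorem zip_flags (ws : List String) :
    ws.zip (ws.map pvA_susp) = ws.map (fun w => (w, pvA_susp w)) := by
  induction ws with
  | nil => rfl
  | cons w ws ih => simp only [List.map_cons, List.zip_cons_cons, ih]

theorem foldl_emit (l : List (Bool × List String)) : ∀ (a : List String),
    l.foldl (fun acc p => acc ++ pvB_emit p.1 p.2) a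
      = a ++ l.flatMap (fun p => pvB_emit p.1 p.2) := by
  induction l with
  | nil => simp
  | cons p l ih => intro a; simp [ih]

-- ===== VERDICT (by name: the statement is the Claim_ definition above) =====
theorem validate_text_coherence_spec : Claim_equal_validate_text_coherence := by
  intro text _
  unfold Spec_validate_text_coherence validate_text_coherence validate_text_coherence_alt
  rw [susp_eq]
  split
  · rfl
  · split
    · rfl
    · rw [count_eq, zip_flags]
      split
      · rw [foldl_emit, loopA_eq_bRun]; simp [pvBRun]
      · rfl
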